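-- pv_equiv track=rewrite | github.com/Jus973/nfl-sentiment-analysis | src/processing/add_lex_scores.py | count_lexicon_hits
-- ===== SOURCE A (Python) =====
-- POSITIVE_CUES = {
--     "great", "good", "huge", "steal", "love", "solid", "perfect",
--     "win", "upgrade", "elite", "underrated", "value", "robbery",
--     "fleeced", "cook", "cooking", "balling", "insane", "nice"
-- }
--
-- NEGATIVE_CUES = {
--     "bad", "awful", "terrible", "overpaid", "trash", "hate",
--     "washed", "regret", "disaster", "loss", "downgrade", "mid",
--     "sell", "fraud", "bust", "horrible", "dogshit", "ass"
-- }
--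
-- NEUTRAL_CUES = {
--     "depends", "meh", "fine", "okay", "average", "we'll see",
--     "idk", "maybe", "could be", "not sure"
-- }
--
-- def count_lexicon_hits(tokens):
--     pos = neg = neu = 0
--
--     for t in tokens:
--         if t in POSITIVE_CUES:
--             pos += 1
--         if t in NEGATIVE_CUES:
--             neg += 1
--         if t in NEUTRAL_CUES:
--             neu += 1
--
--     return pos, neu, neg
-- ===== SOURCE B (Python) =====
-- POSITIVE_CUES = {
--     "great", "good", "huge", "steal", "love", "solid", "perfect",
--     "win", "upgrade", "elite", "underrated", "value", "robbery",
--     "fleeced", "cook", "cooking", "balling", "insane", "nice"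
-- }
--
-- NEGATIVE_CUES = {
--     "bad", "awful", "terrible", "overpaid", "trash", "hate",
--     "washed", "regret", "disaster", "loss", "downgrade", "mid",
--     "sell", "fraud", "bust", "horrible", "dogshit", "ass"
-- }
--
-- NEUTRAL_CUES = {
--     "depends", "meh", "fine", "okay", "average", "we'll see",
--     "idk", "maybe", "could be", "not sure"
-- }
--
-- def count_lexicon_hits(tokens):
--     # build a frequency table once, then look up each lexicon word in it
--     freq = {}
--     for t in tokens:
--         freq[t] = freq.get(t, 0) + 1
--     pos = sum(freq.get(w, 0) for w in POSITIVE_CUES)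
--     neu = sum(freq.get(w, 0) for w in NEUTRAL_CUES)
--     neg = sum(freq.get(w, 0) for w in NEGATIVE_CUES)
--     return pos, neu, neg
-- ===== Notes on version B (the rewrite author's own statement) =====
-- stated objective: alternative
-- what changed: Replaces the per-token three-way membership classification with a table-then-lookup strategy: one pass builds a frequency table of the tokens, then each count is the sum of the table entries of that lexicon's words.
import Mathlib
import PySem

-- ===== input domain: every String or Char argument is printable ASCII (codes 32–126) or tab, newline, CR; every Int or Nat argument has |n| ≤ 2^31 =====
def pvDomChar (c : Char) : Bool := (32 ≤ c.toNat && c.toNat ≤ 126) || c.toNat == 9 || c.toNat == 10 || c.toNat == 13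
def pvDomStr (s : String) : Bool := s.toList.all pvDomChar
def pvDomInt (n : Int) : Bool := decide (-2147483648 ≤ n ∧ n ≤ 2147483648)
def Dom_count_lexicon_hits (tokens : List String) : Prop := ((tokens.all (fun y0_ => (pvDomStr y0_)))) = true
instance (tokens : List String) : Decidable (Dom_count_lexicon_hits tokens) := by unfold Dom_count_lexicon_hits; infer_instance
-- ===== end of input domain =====

-- B replaces A's per-token three-way membership classification by a frequency table built in one
-- pass, each count then being the sum of the table entries of that lexicon's words (alternative).

-- ===== PORT A =====
def posCues : List String :=
  ["great", "good", "huge", "steal", "love", "solid", "perfect",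
   "win", "upgrade", "elite", "underrated", "value", "robbery",
   "fleeced", "cook", "cooking", "balling", "insane", "nice"]

def negCues : List String :=
  ["bad", "awful", "terrible", "overpaid", "trash", "hate",
   "washed", "regret", "disaster", "loss", "downgrade", "mid",
   "sell", "fraud", "bust", "horrible", "dogshit", "ass"]

def neuCues : List String :=
  ["depends", "meh", "fine", "okay", "average", "we'll see",
   "idk", "maybe", "could be", "not sure"]

def count_lexicon_hits (tokens : List String) : Int × Int × Int :=
  let st := tokens.foldl
    (fun (st : Int × Int × Int) t =>
      let pos := if posCues.contains t then st.1 + 1 else st.1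
      let neg := if negCues.contains t then st.2.1 + 1 else st.2.1
      let neu := if neuCues.contains t then st.2.2 + 1 else st.2.2
      (pos, neg, neu))
    (0, 0, 0)
  (st.1, st.2.2, st.2.1)

-- ===== PORT B =====
def count_lexicon_hits_alt (tokens : List String) : Int × Int × Int :=
  let freq : PySem.Dict String Int :=
    tokens.foldl (fun d t => d.insert t (d.getD t 0 + 1)) PySem.Dict.empty
  let pos := (posCues.map (fun w => freq.getD w 0)).sum
  let neu := (neuCues.map (fun w => freq.getD w 0)).sum
  let neg := (negCues.map (fun w => freq.getD w 0)).sum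
  (pos, neu, neg)

-- ===== PRECONDITION & SPEC =====
def Spec_count_lexicon_hits (tokens : List String) (out : Int × Int × Int) : Prop := out = count_lexicon_hits_alt tokens
instance (tokens : List String) (out : Int × Int × Int) : Decidable (Spec_count_lexicon_hits tokens out) := by unfold Spec_count_lexicon_hits; infer_instance

-- ===== CLAIM (what is proved, stated in full; the proofs are below) =====
def Claim_equal_count_lexicon_hits : Prop := ∀ (tokens : List String), Dom_count_lexicon_hits tokens → Spec_count_lexicon_hits tokens (count_lexicon_hits tokens)

-- ===== LEMMAS AND PROOFS =====

-- countP over an "or" of membership splits off the fresh word's own count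
theorem countP_or_mem (c : String) (cs : List String) (hc : c ∉ cs) :
    ∀ tokens : List String,
      tokens.countP (fun t => decide (t = c) || decide (t ∈ cs))
        = tokens.count c + tokens.countP (fun t => decide (t ∈ cs)) := by
  intro tokens
  induction tokens with
  | nil => simp
  | cons t ts ih =>
      simp only [List.countP_cons, List.count_cons, ih]
      by_cases h : t = c
      · subst h
        have h3 : t ∉ cs := hc
        simp [h3]; omega
      · by_cases h2 : t ∈ cs <;> simp [h, h2] <;> omega

-- contains vs. decidable membership
theorem countP_contains_eq (tokens cues : List String) :
    tokens.countP (fun t => cues.contains t) = tokens.countP (fun t => decide (t ∈ cues)) :=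
  List.countP_congr (by intro t _; simp [List.contains_eq_mem])

-- summing the token-count of each word of a duplicate-free lexicon
-- equals counting the tokens that lie in the lexicon
theorem sum_count_eq_countP (tokens : List String) :
    ∀ cues : List String, cues.Nodup →
      (cues.map (fun w => ((tokens.count w : Nat) : Int))).sum
        = ((tokens.countP (fun t => decide (t ∈ cues)) : Nat) : Int) := by
  intro cues hnd
  induction cues with
  | nil => simp
  | cons c cs ih =>
      rcases List.nodup_cons.mp hnd with ⟨hc, hcs⟩
      simp only [List.map_cons, List.sum_cons, ih hcs]
      have hcong : tokens.countP (fun t => decide (t ∈ c :: cs))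
          = tokens.countP (fun t => decide (t = c) || decide (t ∈ cs)) := by
        apply List.countP_congr
        intro t _
        simp [List.mem_cons]
      rw [hcong, countP_or_mem c cs hc tokens]
      push_cast
      ring

-- A's loop adds the three membership counts onto its accumulator
theorem foldA (tokens : List String) :
    ∀ p n u : Int,
      tokens.foldl
        (fun (st : Int × Int × Int) t =>
          let pos := if posCues.contains t then st.1 + 1 else st.1
          let neg := if negCues.contains t then st.2.1 + 1 else st.2.1
          let neu := if neuCues.contains t then st.2.2 + 1 else st.2.2
          (pos, neg, neu))
        (p, n, u)
      = (p + ((tokens.countP (fun t => posCues.contains t) : Nat) : Int),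
         n + ((tokens.countP (fun t => negCues.contains t) : Nat) : Int),
         u + ((tokens.countP (fun t => neuCues.contains t) : Nat) : Int)) := by
  induction tokens with
  | nil => intro p n u; simp
  | cons t ts ih =>
      intro p n u
      simp only [List.foldl_cons, List.countP_cons, ih]
      refine Prod.ext ?_ (Prod.ext ?_ ?_) <;> simp <;> split_ifs <;> push_cast <;> ring

-- ===== VERDICT (by name: the statement is the Claim_ definition above) =====
theorem count_lexicon_hits_spec : Claim_equal_count_lexicon_hits := by
  intro tokens _
  unfold Spec_count_lexicon_hits count_lexicon_hits count_lexicon_hits_alt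
  simp only [PySem.Dict.foldl_insert_getD_add_one_eq_counter, PySem.Dict.getD_counter,
    foldA tokens 0 0 0]
  rw [sum_count_eq_countP tokens posCues (by decide),
      sum_count_eq_countP tokens negCues (by decide),
      sum_count_eq_countP tokens neuCues (by decide),
      ← countP_contains_eq tokens posCues,
      ← countP_contains_eq tokens negCues,
      ← countP_contains_eq tokens neuCues]
  simp
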